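-- pv_equiv track=rewrite | github.com/sarishtshreshth0/plag_extract | Project_CodeNet_Python800/p03696/s470951460.py | check_l
-- ===== SOURCE A (Python) =====
-- def check_l(A):
--     for i in range(1,len(A)+1):
--         if not i==len(A):
--             if A[-i]=="(":
--                 pass
--             else:
--                 return i
--                 break
--         elif i==len(A):
--             if A[-i]=="(":
--                 return 0
--             else:
--                 return i
--                 break
-- ===== SOURCE B (Python) =====
-- def check_l(A):
--     # single forward pass remembering the index of the last element that is not "("
--     last = -1
--     for j, x in enumerate(A):
--         if x != "(":
--             last = j
--     if last == -1:
--         return 0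
--     return len(A) - last
-- ===== Notes on version B (the rewrite author's own statement) =====
-- stated objective: simpler
-- what changed: Replaces the backward scan with early returns and a special elif branch for the last position by a single forward pass that records the last non-'(' index and computes the answer as len(A)-last in closed form.
-- outside the precondition, e.g. on check_l([]): A returns None, B returns 0
import Mathlib
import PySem

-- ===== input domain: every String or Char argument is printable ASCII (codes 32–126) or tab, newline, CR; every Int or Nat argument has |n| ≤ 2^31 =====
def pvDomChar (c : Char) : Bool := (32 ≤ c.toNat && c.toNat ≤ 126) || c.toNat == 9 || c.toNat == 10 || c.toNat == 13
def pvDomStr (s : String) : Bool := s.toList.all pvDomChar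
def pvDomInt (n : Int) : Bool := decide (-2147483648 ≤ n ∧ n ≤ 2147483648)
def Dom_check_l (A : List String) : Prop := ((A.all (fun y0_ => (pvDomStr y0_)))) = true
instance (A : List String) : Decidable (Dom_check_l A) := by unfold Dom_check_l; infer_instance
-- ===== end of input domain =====

-- B replaces A's backward scan with early returns by one forward pass recording the
-- last non-"(" index and a closed-form len(A) - last; objective: simpler.

-- ===== PORT A =====
-- for i in range(1, len(A)+1): early return ⇒ Option-valued recursion on i.
-- A[-i] is always in range for 1 ≤ i ≤ len(A), so '.getD ""' is never the default here.
def check_l_go (A : List String) (i : Nat) : Option Int :=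
  if i ≥ A.length + 1 then none     -- loop exhausted (only reachable for A = [])
  else
    if ¬ (i = A.length) then
      if (PySem.List.pyGet? A (-(i : Int))).getD "" == "(" then
        check_l_go A (i + 1)
      else some (i : Int)
    else
      if (PySem.List.pyGet? A (-(i : Int))).getD "" == "(" then some 0
      else some (i : Int)
  termination_by A.length + 1 - i

-- Python returns None when the loop never runs (A = []); excluded by Pre_check_l, default 0.
def check_l (A : List String) : Int :=
  (check_l_go A 1).getD 0

-- ===== PORT B =====
def check_l_alt (A : List String) : Int :=
  let last := (PySem.List.enumerate A).foldl
    (fun (last : Int) jx => if jx.2 ≠ "(" then jx.1 else last) (-1)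
  if last = -1 then 0 else (A.length : Int) - last

-- ===== PRECONDITION & SPEC =====
-- Pre_ excludes only the empty list, on which A's loop never runs and A returns None,
-- which is not a value of the declared Int type.
def Pre_check_l (A : List String) : Prop := A ≠ []
instance (A : List String) : Decidable (Pre_check_l A) := by unfold Pre_check_l; infer_instance
def pvWitness_check_l : List String := ["(", ")", "("]
def Spec_check_l (A : List String) (out : Int) : Prop := out = check_l_alt A
instance (A : List String) (out : Int) : Decidable (Spec_check_l A out) := by unfold Spec_check_l; infer_instance

-- ===== CLAIM (what is proved, stated in full; the proofs are below) =====
def Claim_equal_check_l : Prop := ∀ (A : List String), Dom_check_l A → Pre_check_l A → Spec_check_l A (check_l A)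

-- ===== LEMMAS AND PROOFS =====

-- number of trailing "(" entries of A = takeWhile on the reverse
def pvT (A : List String) : Nat := (A.reverse.takeWhile (· == "(")).length

theorem pvT_le (A : List String) : pvT A ≤ A.length := by
  have h := List.takeWhile_sublist (l := A.reverse) (p := (· == "("))
  have := h.length_le
  simpa [pvT] using this

-- A's loop, characterised: starting at position i (1-based from the end), with
-- s = A.reverse.drop (i-1) the part still to scan.
theorem check_l_go_spec (A : List String) (i : Nat) (h1 : 1 ≤ i) (h2 : i ≤ A.length) :
    check_l_go A i =
      some (if (((A.reverse.drop (i-1)).takeWhile (· == "(")).length = (A.reverse.drop (i-1)).length)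
              then 0 else ((i : Int) + ((A.reverse.drop (i-1)).takeWhile (· == "(")).length)) := by
  induction hn : A.length + 1 - i using Nat.strong_induction_on generalizing i with
  | _ n ih =>
  have hidx : A.length - i < A.length := by omega
  have hsome : PySem.List.pyGet? A (-(i : Int)) = some A[A.length - i] := by
    rw [PySem.List.pyGet?_neg_natCast (xs := A) (k := i) (by omega) h2]
    exact List.getElem?_eq_getElem hidx
  have hrev : A.reverse.drop (i-1) = A[A.length - i] :: A.reverse.drop i := by
    have h1' : i - 1 < A.reverse.length := by simp; omega
    have hix : A.length - 1 - (i - 1) = A.length - i := by omega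
    simp [List.drop_eq_getElem_cons h1', List.getElem_reverse, hix]
    omega
  rw [check_l_go]
  rw [if_neg (by omega : ¬ i ≥ A.length + 1)]
  by_cases hlast : i = A.length
  · -- last iteration: the remaining segment is a single element
    have hdrop1 : A.reverse.drop i = [] := by
      apply List.drop_eq_nil_of_le; simp; omega
    rw [if_neg (not_not_intro hlast), hsome]
    simp only [Option.getD_some]
    rw [hrev, hdrop1]
    by_cases hc : A[A.length - i] == "("
    · rw [if_pos hc]
      simp [hc]
    · rw [if_neg hc]
      simp [hc]
  · -- middle iteration
    rw [if_pos hlast, hsome]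
    simp only [Option.getD_some]
    rw [hrev]
    by_cases hc : A[A.length - i] == "("
    · rw [if_pos hc]
      have hrec := ih (A.length + 1 - (i+1)) (by omega) (i+1) (by omega) (by omega) rfl
      have hsucc : (i + 1) - 1 = i := rfl
      rw [hrec, hsucc]
      simp only [List.takeWhile_cons, hc, if_pos, List.length_cons]
      split_ifs with h3 h4 h4
      · rfl
      · omega
      · omega
      · push_cast; ring
    · rw [if_neg hc]
      simp [hc]

-- B's fold, characterised by the same quantity.
theorem alt_fold_spec (A : List String) :
    (PySem.List.enumerate A).foldl
      (fun (last : Int) jx => if jx.2 ≠ "(" then jx.1 else last) (-1) =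
      (if pvT A = A.length then -1 else (A.length : Int) - 1 - pvT A) := by
  induction A using List.reverseRecOn with
  | nil => simp [pvT]
  | append_singleton A x ih =>
    have henum : PySem.List.enumerate (A ++ [x]) 0
        = PySem.List.enumerate A 0 ++ [((A.length : Int), x)] := by
      simpa using (PySem.List.enumerate_append (xs := A) (ys := [x]) (s := 0))
    have hlen : (A ++ [x]).length = A.length + 1 := by simp
    rw [henum, List.foldl_append]
    simp only [List.foldl_cons, List.foldl_nil]
    by_cases hx : x = "("
    · have hT : pvT (A ++ [x]) = pvT A + 1 := by
        simp [pvT, List.reverse_append, hx]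
      have hTle := pvT_le A
      rw [hT, hlen]
      simp only [hx, ne_eq, not_true_eq_false, if_false, ih]
      split_ifs with h1 h2 h2
      · rfl
      · omega
      · omega
      · push_cast; ring
    · have hT : pvT (A ++ [x]) = 0 := by
        simp [pvT, List.reverse_append, hx]
      rw [hT, hlen]
      simp only [ne_eq, hx, not_false_eq_true, if_true]
      rw [if_neg (by omega)]
      push_cast; ring

-- ===== VERDICT (by name: the statement is the Claim_ definition above) =====
theorem check_l_spec : Claim_equal_check_l := by
  intro A _ hpre
  unfold Spec_check_l check_l check_l_alt
  have hn : 1 ≤ A.length := by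
    cases A with
    | nil => exact absurd rfl hpre
    | cons a l => simp
  have hgo := check_l_go_spec A 1 le_rfl hn
  have hlenr : A.reverse.length = A.length := A.length_reverse
  rw [show (1:Nat) - 1 = 0 from rfl, List.drop_zero, hlenr] at hgo
  rw [hgo]
  simp only [Option.getD_some]
  rw [alt_fold_spec]
  have hTle := pvT_le A
  simp only [pvT] at *
  split_ifs with h1 h2 h2
  · rfl
  · omega
  · omega
  · push_cast; ring
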